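-- pv_equiv track=rewrite | github.com/sr33j/FindYourPokemon | Pokedex.py | closest_length
-- ===== SOURCE A (Python) =====
-- def closest_length(name, closePokemon):
-- 	min_diff = 1000000
-- 	your_pokemon = []
-- 	for pokemon in closePokemon:
-- 		diff = abs(len(name)-len(pokemon))
-- 		if diff < min_diff:
-- 			your_pokemon = [pokemon]
-- 			min_diff = diff
-- 		elif diff == min_diff:
-- 			your_pokemon.append(pokemon)
-- 	return your_pokemon
-- ===== SOURCE B (Python) =====
-- def closest_length(name, closePokemon):
--     m = min([abs(len(name) - len(p)) for p in closePokemon] + [1000000])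
--     return [p for p in closePokemon if abs(len(name) - len(p)) == m]
-- ===== Notes on version B (the rewrite author's own statement) =====
-- stated objective: simpler
-- what changed: Replaced the interleaved min-tracking/accumulator loop by a two-pass reduce-then-filter: compute the minimum difference (capped by the 1000000 sentinel via min with it appended), then filter the list for that difference.
import Mathlib
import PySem

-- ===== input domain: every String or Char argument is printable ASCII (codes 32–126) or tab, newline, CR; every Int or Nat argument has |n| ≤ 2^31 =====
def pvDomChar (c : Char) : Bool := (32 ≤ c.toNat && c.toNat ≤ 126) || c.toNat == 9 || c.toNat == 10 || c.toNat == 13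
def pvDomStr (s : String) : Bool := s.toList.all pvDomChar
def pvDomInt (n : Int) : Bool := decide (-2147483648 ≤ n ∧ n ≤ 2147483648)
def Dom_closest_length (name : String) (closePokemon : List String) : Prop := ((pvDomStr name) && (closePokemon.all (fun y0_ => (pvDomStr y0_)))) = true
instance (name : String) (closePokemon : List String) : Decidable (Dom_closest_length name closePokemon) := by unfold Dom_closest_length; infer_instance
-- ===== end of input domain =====

-- B replaces A's interleaved min-tracking/accumulator loop by a two-pass
-- reduce-then-filter (min of the diffs with the 1000000 sentinel appended, then a
-- filter for that minimum); objective: simpler.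

-- shared primitive: abs(len(name)-len(p))
def pvDiffLen (name p : String) : Int := |PySem.Str.len name - PySem.Str.len p|

-- ===== PORT A =====
def closest_length (name : String) (closePokemon : List String) : List String :=
  (closePokemon.foldl
    (fun (st : Int × List String) pokemon =>
      let diff := pvDiffLen name pokemon
      if diff < st.1 then (diff, [pokemon])
      else if diff = st.1 then (st.1, st.2 ++ [pokemon])
      else st)
    ((1000000 : Int), ([] : List String))).2

-- ===== PORT B =====
-- Source B: m = min([abs(len(name)-len(p)) for p in closePokemon] + [1000000]);
--       return [p for p in closePokemon if abs(len(name)-len(p)) == m]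
-- (the none branch of min? is unreachable: the list ends with the sentinel)
def closest_length_alt (name : String) (closePokemon : List String) : List String :=
  match PySem.List.min? ((closePokemon.map (fun p => pvDiffLen name p)) ++ [(1000000 : Int)]) (fun x => x) with
  | some m => closePokemon.filter (fun p => pvDiffLen name p == m)
  | none => []

-- ===== PRECONDITION & SPEC =====
def Spec_closest_length (name : String) (closePokemon : List String) (out : List String) : Prop := out = closest_length_alt name closePokemon
instance (name : String) (closePokemon : List String) (out : List String) : Decidable (Spec_closest_length name closePokemon out) := by unfold Spec_closest_length; infer_instance

-- ===== CLAIM (what is proved, stated in full; the proofs are below) =====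
def Claim_equal_closest_length : Prop := ∀ (name : String) (closePokemon : List String), Dom_closest_length name closePokemon → Spec_closest_length name closePokemon (closest_length name closePokemon)

-- ===== LEMMAS AND PROOFS =====

-- running min over diffs, starting from m
def pvMF (name : String) (l : List String) (m : Int) : Int :=
  l.foldl (fun a p => min a (pvDiffLen name p)) m

theorem pvMF_le (name : String) (l : List String) (m : Int) :
    pvMF name l m ≤ m := by
  induction l generalizing m with
  | nil => simp [pvMF]
  | cons p t ih =>
    calc pvMF name (p :: t) m = pvMF name t (min m (pvDiffLen name p)) := rfl
      _ ≤ min m (pvDiffLen name p) := ih _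
      _ ≤ m := min_le_left _ _

-- A's loop computes (running min, accumulator); the accumulator is the filter for the
-- final min, prefixed by acc exactly when the min never improved.
theorem pvLoopA_eq (name : String) (l : List String) (m : Int) (acc : List String) :
    l.foldl
      (fun (st : Int × List String) pokemon =>
        let diff := pvDiffLen name pokemon
        if diff < st.1 then (diff, [pokemon])
        else if diff = st.1 then (st.1, st.2 ++ [pokemon])
        else st) (m, acc)
    = (pvMF name l m,
       (if pvMF name l m = m then acc else []) ++
         l.filter (fun p => pvDiffLen name p == pvMF name l m)) := by
  induction l generalizing m acc with
  | nil => simp [pvMF]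
  | cons p t ih =>
    have hd : pvMF name (p :: t) m = pvMF name t (min m (pvDiffLen name p)) := rfl
    by_cases h1 : pvDiffLen name p < m
    · have hmin : min m (pvDiffLen name p) = pvDiffLen name p := min_eq_right (le_of_lt h1)
      have hM : pvMF name (p :: t) m = pvMF name t (pvDiffLen name p) := by rw [hd, hmin]
      have hMle : pvMF name (p :: t) m ≤ pvDiffLen name p := hM ▸ pvMF_le name t _
      have hMne : pvMF name (p :: t) m ≠ m := by omega
      simp only [List.foldl_cons, if_pos h1, ih, List.filter_cons]
      rw [← hM]
      simp only [if_neg hMne, List.nil_append, beq_iff_eq]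
      by_cases h2 : pvMF name (p :: t) m = pvDiffLen name p
      · simp [h2]
      · have : ¬ pvDiffLen name p = pvMF name (p :: t) m := fun h => h2 h.symm
        simp [h2, this]
    · by_cases h2 : pvDiffLen name p = m
      · have hmin : min m (pvDiffLen name p) = m := by omega
        have hM : pvMF name (p :: t) m = pvMF name t m := by rw [hd, hmin]
        simp only [List.foldl_cons, if_neg h1, if_pos h2, ih, List.filter_cons]
        rw [← hM]
        by_cases h3 : pvMF name (p :: t) m = m
        · have : pvDiffLen name p = pvMF name (p :: t) m := by omega
          simp [h3, this]
        · have : ¬ pvDiffLen name p = pvMF name (p :: t) m := by omega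
          simp [h3, this]
      · have h3 : m < pvDiffLen name p := by omega
        have hmin : min m (pvDiffLen name p) = m := by omega
        have hM : pvMF name (p :: t) m = pvMF name t m := by rw [hd, hmin]
        have hMle : pvMF name (p :: t) m ≤ m := pvMF_le name _ _
        have : ¬ pvDiffLen name p = pvMF name (p :: t) m := by omega
        simp only [List.foldl_cons, if_neg h1, if_neg h2, ih, List.filter_cons]
        rw [← hM]
        simp [this]

theorem pvFoldlMin_out (l : List Int) (a b : Int) :
    l.foldl min (min a b) = min (l.foldl min a) b := by
  induction l generalizing a with
  | nil => rfl
  | cons x t ih =>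
    simp only [List.foldl_cons]
    rw [show min (min a b) x = min (min a x) b by omega, ih]

theorem pvMinSentinel (name : String) (l : List String) :
    PySem.List.min? ((l.map (fun p => pvDiffLen name p)) ++ [(1000000 : Int)]) (fun x => x)
      = some (pvMF name l 1000000) := by
  cases l with
  | nil => simp [pvMF, PySem.List.min?]
  | cons p t =>
    simp only [List.map_cons, List.cons_append, PySem.List.min?_id_cons]
    congr 1
    rw [List.foldl_append]
    simp only [List.foldl_cons, List.foldl_nil, List.foldl_map]
    have h1 : pvMF name (p :: t) 1000000
        = t.foldl (fun a q => min a (pvDiffLen name q)) (min 1000000 (pvDiffLen name p)) := rfl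
    -- both sides are min of the same elements; push the extra operand out
    have h2 : ∀ (m : Int), t.foldl (fun a q => min a (pvDiffLen name q)) m
        = (t.map (fun q => pvDiffLen name q)).foldl min m := by
      intro m; rw [List.foldl_map]
    rw [h2] at h1
    rw [h2]
    rw [show min 1000000 (pvDiffLen name p) = min (pvDiffLen name p) 1000000 by omega] at h1
    rw [pvFoldlMin_out] at h1
    rw [h1]

-- ===== VERDICT (by name: the statement is the Claim_ definition above) =====
theorem closest_length_spec : Claim_equal_closest_length := by
  intro name cp _
  unfold Spec_closest_length closest_length closest_length_alt
  rw [pvLoopA_eq, pvMinSentinel]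
  have : pvMF name cp 1000000 = 1000000 ∨ pvMF name cp 1000000 ≠ 1000000 := em _
  rcases this with h | h <;> simp [h]
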